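-- pv_equiv track=rewrite | github.com/Suffix30/LANTERNv2.0 | agent/agent_black/adaptive_engine.py | _code_to_patch
-- ===== SOURCE A (Python) =====
-- def _code_to_patch(code: str, target_file: str) -> str:
--     lines = code.split("\n")
--     patch_lines = [
--         f"--- a/{target_file}",
--         f"+++ b/{target_file}",
--         "@@ -1,0 +1,{len(lines)} @@",
--     ]
--     for line in lines:
--         patch_lines.append(f"+{line}")
--     return "\n".join(patch_lines)
-- ===== SOURCE B (Python) =====
-- def _code_to_patch(code: str, target_file: str) -> str:
--     header = (
--         "--- a/" + target_file
--         + "\n+++ b/" + target_file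
--         + "\n@@ -1,0 +1,{len(lines)} @@\n+"
--     )
--     return header + code.replace("\n", "\n+")
-- ===== Notes on version B (the rewrite author's own statement) =====
-- stated objective: idiomatic
-- what changed: Replaces the split-into-lines + per-line append loop + join with direct string concatenation of the header and a single str.replace('\n', '\n+') on the whole code string.
import Mathlib
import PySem

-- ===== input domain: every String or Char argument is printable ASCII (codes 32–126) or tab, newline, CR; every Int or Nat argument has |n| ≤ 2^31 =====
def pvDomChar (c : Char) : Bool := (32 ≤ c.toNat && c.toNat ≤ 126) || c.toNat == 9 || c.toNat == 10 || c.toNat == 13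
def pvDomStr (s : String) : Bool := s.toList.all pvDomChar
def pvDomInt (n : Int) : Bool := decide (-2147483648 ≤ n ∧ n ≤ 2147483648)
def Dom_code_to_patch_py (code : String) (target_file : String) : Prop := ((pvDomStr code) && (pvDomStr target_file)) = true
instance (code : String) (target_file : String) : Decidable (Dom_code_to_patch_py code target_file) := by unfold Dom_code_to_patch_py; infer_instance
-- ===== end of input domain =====

-- B builds the patch by direct concatenation and one replace instead of split + per-line loop + join (idiomatic; same cost).

-- ===== PORT A =====
-- split code on "\n", build the three header lines (the third is a literal, not an f-string),
-- append "+line" for each line, join with "\n"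
def code_to_patch_py (code : String) (target_file : String) : String :=
  let lines : List (List Char) := PySem.Chars.splitOn code.toList ['\n']
  let patch_lines : List (List Char) :=
    ["--- a/".toList ++ target_file.toList,
     "+++ b/".toList ++ target_file.toList,
     "@@ -1,0 +1,{len(lines)} @@".toList]
  let patch_lines := lines.foldl (fun acc line => acc ++ ['+' :: line]) patch_lines
  String.ofList (PySem.Chars.join ['\n'] patch_lines)

-- ===== PORT B =====
-- header by concatenation, body by a single replace "\n" -> "\n+"
def code_to_patch_py_alt (code : String) (target_file : String) : String :=
  let header : List Char :=
    "--- a/".toList ++ target_file.toList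
      ++ "\n+++ b/".toList ++ target_file.toList
      ++ "\n@@ -1,0 +1,{len(lines)} @@\n+".toList
  String.ofList (header ++ PySem.Chars.replace code.toList ['\n'] ['\n', '+'])

-- ===== PRECONDITION & SPEC =====
def Spec_code_to_patch_py (code : String) (target_file : String) (out : String) : Prop := out = code_to_patch_py_alt code target_file
instance (code : String) (target_file : String) (out : String) : Decidable (Spec_code_to_patch_py code target_file out) := by unfold Spec_code_to_patch_py; infer_instance

-- ===== CLAIM (what is proved, stated in full; the proofs are below) =====
def Claim_equal_code_to_patch_py : Prop := ∀ (code : String) (target_file : String), Dom_code_to_patch_py code target_file → Spec_code_to_patch_py code target_file (code_to_patch_py code target_file)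

-- ===== LEMMAS AND PROOFS =====

-- structural single-'\n' split: first segment and remaining segments
def pvSplitNL : List Char → List Char × List (List Char)
  | [] => ([], [])
  | a :: t =>
    let r := pvSplitNL t
    if a = '\n' then ([], r.1 :: r.2) else (a :: r.1, r.2)

-- structural replace "\n" -> "\n+"
def pvReplNL : List Char → List Char
  | [] => []
  | a :: t => if a = '\n' then '\n' :: '+' :: pvReplNL t else a :: pvReplNL t

theorem pv_go_split (l : List Char) : ∀ (fuel : Nat), l.length ≤ fuel →
    ∀ (cur : List Char) (acc : List (List Char)),
    PySem.Chars.splitOn.go ['\n'] fuel l cur acc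
      = acc.reverse ++ (cur.reverse ++ (pvSplitNL l).1) :: (pvSplitNL l).2 := by
  induction l with
  | nil =>
    intro fuel _ cur acc
    cases fuel <;> simp [PySem.Chars.splitOn.go, pvSplitNL]
  | cons c t ih =>
    intro fuel hf cur acc
    cases fuel with
    | zero => simp at hf
    | succ f =>
      by_cases hc : c = '\n'
      · subst hc
        rw [show PySem.Chars.splitOn.go ['\n'] (f+1) ('\n' :: t) cur acc
            = PySem.Chars.splitOn.go ['\n'] f t [] (cur.reverse :: acc) by
          simp [PySem.Chars.splitOn.go, List.isPrefixOf]]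
        rw [ih f (by simpa using hf) [] (cur.reverse :: acc)]
        simp [pvSplitNL]
      · rw [show PySem.Chars.splitOn.go ['\n'] (f+1) (c :: t) cur acc
            = PySem.Chars.splitOn.go ['\n'] f t (c :: cur) acc by
          simp only [PySem.Chars.splitOn.go, List.isPrefixOf]
          simp
          exact fun h => absurd h.symm hc]
        rw [ih f (by simpa using hf) (c :: cur) acc]
        simp [pvSplitNL, hc]

theorem pv_splitOn_eq (l : List Char) :
    PySem.Chars.splitOn l ['\n'] = (pvSplitNL l).1 :: (pvSplitNL l).2 := by
  rw [PySem.Chars.splitOn, pv_go_split l (l.length + 1) (by omega) [] []]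
  simp

theorem pv_go_repl (l : List Char) : ∀ (fuel : Nat), l.length ≤ fuel → ∀ (acc : List Char),
    PySem.Chars.replace.go ['\n'] ['\n', '+'] fuel l acc = acc.reverse ++ pvReplNL l := by
  induction l with
  | nil =>
    intro fuel _ acc
    cases fuel <;> simp [PySem.Chars.replace.go, pvReplNL]
  | cons c t ih =>
    intro fuel hf acc
    cases fuel with
    | zero => simp at hf
    | succ f =>
      by_cases hc : c = '\n'
      · subst hc
        rw [show PySem.Chars.replace.go ['\n'] ['\n', '+'] (f+1) ('\n' :: t) acc
            = PySem.Chars.replace.go ['\n'] ['\n', '+'] f t ('+' :: '\n' :: acc) by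
          simp [PySem.Chars.replace.go, List.isPrefixOf]]
        rw [ih f (by simpa using hf) ('+' :: '\n' :: acc)]
        simp [pvReplNL]
      · rw [show PySem.Chars.replace.go ['\n'] ['\n', '+'] (f+1) (c :: t) acc
            = PySem.Chars.replace.go ['\n'] ['\n', '+'] f t (c :: acc) by
          simp only [PySem.Chars.replace.go, List.isPrefixOf]
          simp
          exact fun h => absurd h.symm hc]
        rw [ih f (by simpa using hf) (c :: acc)]
        simp [pvReplNL, hc]

theorem pv_replace_eq (l : List Char) :
    PySem.Chars.replace l ['\n'] ['\n', '+'] = pvReplNL l := by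
  rw [PySem.Chars.replace]
  simpa using pv_go_repl l l.length le_rfl []

-- join step: with a nonempty tail, join pulls off the head segment and one separator
theorem pv_join_cons (h : List Char) (p : List Char) (ps : List (List Char)) :
    PySem.Chars.join ['\n'] (h :: p :: ps) = h ++ '\n' :: PySem.Chars.join ['\n'] (p :: ps) := by
  simp [PySem.Chars.join, List.intercalate]

-- join distributes over a prefix of the head segment
theorem pv_join_append (x y : List Char) (ps : List (List Char)) :
    PySem.Chars.join ['\n'] ((x ++ y) :: ps) = x ++ PySem.Chars.join ['\n'] (y :: ps) := by
  cases ps <;> simp [PySem.Chars.join, List.intercalate]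

-- the crux: joining the '+'-prefixed segments of the split equals '+' followed by the replace
theorem pv_join_split_eq_repl (l : List Char) :
    PySem.Chars.join ['\n']
      (((pvSplitNL l).1 :: (pvSplitNL l).2).map (fun s => '+' :: s))
      = '+' :: pvReplNL l := by
  induction l with
  | nil => simp [pvSplitNL, pvReplNL, PySem.Chars.join, List.intercalate]
  | cons c t ih =>
    by_cases hc : c = '\n'
    · subst hc
      simp only [pvSplitNL, pvReplNL, reduceIte]
      rw [List.map_cons, List.map_cons, pv_join_cons]
      simpa using ih
    · simp only [pvSplitNL, pvReplNL, if_neg hc, List.map_cons]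
      rw [List.map_cons] at ih
      rw [show ('+' :: (pvSplitNL t).1) = ['+'] ++ (pvSplitNL t).1 from rfl, pv_join_append] at ih
      have ih' : PySem.Chars.join ['\n'] ((pvSplitNL t).1 :: (pvSplitNL t).2.map (fun s => '+' :: s)) = pvReplNL t := by
        simpa using ih
      rw [show ('+' :: c :: (pvSplitNL t).1) = ['+', c] ++ (pvSplitNL t).1 from rfl, pv_join_append, ih']
      rfl

-- the A-side foldl is plain list append of the '+'-prefixed lines
theorem pv_foldl_plus (lines init : List (List Char)) :
    lines.foldl (fun acc line => acc ++ ['+' :: line]) init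
      = init ++ lines.map (fun line => '+' :: line) := by
  exact PySem.List.foldl_append_singleton_eq_map (fun line => '+' :: line) lines init

-- ===== VERDICT (by name: the statement is the Claim_ definition above) =====
theorem code_to_patch_py_spec : Claim_equal_code_to_patch_py := by
  intro code target_file _
  unfold Spec_code_to_patch_py code_to_patch_py code_to_patch_py_alt
  simp only [pv_foldl_plus, pv_splitOn_eq, pv_replace_eq]
  rw [List.map_cons, show ([("--- a/".toList ++ target_file.toList),
      ("+++ b/".toList ++ target_file.toList),
      ("@@ -1,0 +1,{len(lines)} @@".toList)] : List (List Char))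
      ++ ('+' :: (pvSplitNL code.toList).1) :: (pvSplitNL code.toList).2.map (fun s => '+' :: s)
      = ("--- a/".toList ++ target_file.toList) :: ("+++ b/".toList ++ target_file.toList)
        :: ("@@ -1,0 +1,{len(lines)} @@".toList)
        :: ('+' :: (pvSplitNL code.toList).1) :: (pvSplitNL code.toList).2.map (fun s => '+' :: s) from rfl]
  rw [pv_join_cons, pv_join_cons, pv_join_cons]
  rw [show ('+' :: (pvSplitNL code.toList).1) :: (pvSplitNL code.toList).2.map (fun s => '+' :: s)
      = (((pvSplitNL code.toList).1 :: (pvSplitNL code.toList).2).map (fun s => '+' :: s)) from rfl]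
  rw [pv_join_split_eq_repl]
  simp
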